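-- pv_equiv track=rewrite | github.com/roosbot/Bootcamp-Assignments | module-1/Code-Simplicity-Efficiency/your-code/challenge-3-roos.py | longestSide
-- ===== SOURCE A (Python) =====
-- def longestSide(number):
--
--     solutions = []
--     longest_side = 0
--
--     solutions = [[x, y, z] for z in range(3, number) for y in range(4, number) for x in range(5, number)]
--
--     for solution in solutions:
--         if longest_side < max(solution):
--             longest_side = max(solution)
--
--     return longest_side
-- ===== SOURCE B (Python) =====
-- def longestSide(number):
--     # Closed form: the triples cover x in 5..number-1, y in 4.., z in 3..;
--     # when any range is empty there are no triples and the answer is 0,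
--     # otherwise the overall maximum coordinate is number-1.
--     return number - 1 if number >= 6 else 0
-- ===== Notes on version B (the rewrite author's own statement) =====
-- stated objective: faster
-- what changed: Replaced the O(n^3) materialised triple comprehension and max-scan with a constant-time closed form (largest coordinate, or zero when no triples exist).
import Mathlib
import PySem

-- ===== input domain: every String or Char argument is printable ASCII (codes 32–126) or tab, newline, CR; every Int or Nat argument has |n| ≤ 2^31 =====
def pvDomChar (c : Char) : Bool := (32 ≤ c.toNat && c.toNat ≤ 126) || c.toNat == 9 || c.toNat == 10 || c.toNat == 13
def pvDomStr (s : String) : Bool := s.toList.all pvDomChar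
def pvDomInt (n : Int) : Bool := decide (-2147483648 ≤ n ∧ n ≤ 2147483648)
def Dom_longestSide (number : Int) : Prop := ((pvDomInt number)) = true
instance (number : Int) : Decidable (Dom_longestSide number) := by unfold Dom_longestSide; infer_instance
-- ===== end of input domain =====

-- B replaces A's materialised O(n^3) triple list and max-scan by the closed form
-- 'number-1 if number>=6 else 0' (objective: faster, asymptotic).

-- ===== PORT A =====
-- the body of A's update loop: 'if longest_side < max(solution): longest_side = max(solution)'
def pvStep (longest_side : Int) (solution : List Int) : Int :=
  match PySem.List.max? solution (fun v => v) with
  | some m => if longest_side < m then m else longest_side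
  | none => longest_side   -- max([]) raises; unreachable, every solution is a triple

def longestSide (number : Int) : Int :=
  -- solutions = the triple comprehension; then the running-max loop over it
  ((PySem.List.pyRange 3 number 1).flatMap (fun z =>
      (PySem.List.pyRange 4 number 1).flatMap (fun y =>
        (PySem.List.pyRange 5 number 1).map (fun x => [x, y, z])))).foldl pvStep 0

-- ===== PORT B =====
def longestSide_alt (number : Int) : Int :=
  if number ≥ 6 then number - 1 else 0

-- ===== PRECONDITION & SPEC =====
def Spec_longestSide (number : Int) (out : Int) : Prop := out = longestSide_alt number
instance (number : Int) (out : Int) : Decidable (Spec_longestSide number out) := by unfold Spec_longestSide; infer_instance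

-- ===== CLAIM (what is proved, stated in full; the proofs are below) =====
def Claim_equal_longestSide : Prop := ∀ (number : Int), Dom_longestSide number → Spec_longestSide number (longestSide number)

-- ===== LEMMAS AND PROOFS =====

theorem pvFlatMap_nil {α β : Type} (l : List α) :
    l.flatMap (fun _ => ([] : List β)) = [] := by
  induction l <;> simp_all

theorem le_pvStep (acc : Int) (s : List Int) : acc ≤ pvStep acc s := by
  cases h : PySem.List.max? s (fun v => v) with
  | none => simp [pvStep, h]
  | some m => simp only [pvStep, h]; split <;> omega

theorem le_foldl_pvStep (L : List (List Int)) (acc : Int) : acc ≤ L.foldl pvStep acc := by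
  induction L generalizing acc with
  | nil => exact le_refl _
  | cons h t ih => exact le_trans (le_pvStep acc h) (ih _)

theorem foldl_pvStep_le (L : List (List Int)) (acc B : Int) (hacc : acc ≤ B)
    (h : ∀ s ∈ L, ∀ m, PySem.List.max? s (fun v => v) = some m → m ≤ B) :
    L.foldl pvStep acc ≤ B := by
  induction L generalizing acc with
  | nil => exact hacc
  | cons s t ih =>
    refine ih _ ?_ (fun s' hs' => h s' (List.mem_cons_of_mem _ hs'))
    cases hm : PySem.List.max? s (fun v => v) with
    | none => simp only [pvStep, hm]; exact hacc
    | some m =>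
      have := h s (List.mem_cons_self) m hm
      simp only [pvStep, hm]
      split <;> omega

theorem mem_le_foldl_pvStep (L : List (List Int)) (acc : Int) (s : List Int) (m : Int)
    (hs : s ∈ L) (hm : PySem.List.max? s (fun v => v) = some m) :
    m ≤ L.foldl pvStep acc := by
  induction L generalizing acc with
  | nil => cases hs
  | cons h t ih =>
    rcases List.mem_cons.mp hs with rfl | hs'
    · refine le_trans ?_ (le_foldl_pvStep t _)
      simp only [pvStep, hm]
      split <;> omega
    · exact ih _ hs'

theorem longestSide_spec' (number : Int) : longestSide number = longestSide_alt number := by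
  unfold longestSide longestSide_alt
  by_cases h6 : number ≥ 6
  · rw [if_pos h6]
    set L := (PySem.List.pyRange 3 number 1).flatMap (fun z =>
      (PySem.List.pyRange 4 number 1).flatMap (fun y =>
        (PySem.List.pyRange 5 number 1).map (fun x => [x, y, z]))) with hL
    -- every solution's max is < number
    have hub : ∀ s ∈ L, ∀ m, PySem.List.max? s (fun v => v) = some m → m ≤ number - 1 := by
      intro s hs m hm
      rw [hL] at hs
      simp only [List.mem_flatMap, List.mem_map] at hs
      obtain ⟨z, hz, y, hy, x, hx, rfl⟩ := hs
      have hmem := PySem.List.max?_mem hm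
      rw [PySem.List.mem_pyRange_one] at hz hy hx
      simp only [List.mem_cons, List.not_mem_nil, or_false] at hmem
      rcases hmem with rfl | rfl | rfl <;> omega
    -- [number-1, 4, 3] is a solution with max number-1
    have hmem : [number - 1, 4, 3] ∈ L := by
      rw [hL]
      simp only [List.mem_flatMap, List.mem_map]
      exact ⟨3, by rw [PySem.List.mem_pyRange_one]; omega,
             4, by rw [PySem.List.mem_pyRange_one]; omega,
             number - 1, by rw [PySem.List.mem_pyRange_one]; omega, rfl⟩
    have hmax : PySem.List.max? [number - 1, 4, 3] (fun v => v) = some (number - 1) := by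
      rw [PySem.List.max?_id_cons]
      simp only [List.foldl]
      congr 1
      omega
    have h1 := foldl_pvStep_le L 0 (number - 1) (by omega) hub
    have h2 := mem_le_foldl_pvStep L 0 _ _ hmem hmax
    omega
  · rw [if_neg h6]
    have hnil : PySem.List.pyRange 5 number 1 = [] :=
      PySem.List.pyRange_one_eq_nil (by omega)
    simp [hnil, pvFlatMap_nil]

-- ===== VERDICT (by name: the statement is the Claim_ definition above) =====
theorem longestSide_spec : Claim_equal_longestSide := by
  intro number _
  exact longestSide_spec' number
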